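-- pv_equiv track=rewrite | github.com/Lee-nju/data_analysis | model2.py | putC2paras
-- ===== SOURCE A (Python) =====
-- def putC2paras(cons, para_num):
--     # 存放每个参数对应的约束
--     para_cons = []
--     # 右值
--     r = 0
--     for i in range(len(para_num)):
--         para_cons.append([])
--         # 左值
--         l = 0
--         if i != 0:
--             l = r
--             r += para_num[i]
--         else:
--             r = para_num[0]
--         # 对cons中的每条约束
--         for c in cons:
--             # 对c中的每个参数
--             for v in c:
--                 # 如果某个参数在左值和右值之间，将约束加入相应的参数中
--                 if l <= int(v) < r:
--                     para_cons[i].append(c)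
--                 else:
--                     pass
--
--     return para_cons
-- ===== SOURCE B (Python) =====
-- from bisect import bisect_right
--
--
-- def putC2paras(cons, para_num):
--     # prefix boundaries: group i covers [prefix[i], prefix[i+1])
--     prefix = [0]
--     s = 0
--     for p in para_num:
--         s += p
--         prefix.append(s)
--     n = len(para_num)
--     groups = [[] for _ in range(n)]
--     # one pass over every (constraint, variable) pair; bisect finds the group
--     for c in cons:
--         for v in c:
--             j = bisect_right(prefix, v) - 1
--             if 0 <= j < n:
--                 groups[j].append(c)
--     return groups
-- ===== Notes on version B (the rewrite author's own statement) =====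
-- stated objective: faster
-- what changed: Instead of scanning all constraints and all their variables once per group (group-major triple loop), B precomputes the prefix-sum group boundaries once and makes a single pass over every (constraint, variable) pair, locating its group by binary search (bisect_right) and dispatching the constraint there.
-- outside the precondition, e.g. on putC2paras([[3]], [5, -3, 4]): A returns [[[3]], [], [[3]]], B returns [[], [], [[3]]]
import Mathlib
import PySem

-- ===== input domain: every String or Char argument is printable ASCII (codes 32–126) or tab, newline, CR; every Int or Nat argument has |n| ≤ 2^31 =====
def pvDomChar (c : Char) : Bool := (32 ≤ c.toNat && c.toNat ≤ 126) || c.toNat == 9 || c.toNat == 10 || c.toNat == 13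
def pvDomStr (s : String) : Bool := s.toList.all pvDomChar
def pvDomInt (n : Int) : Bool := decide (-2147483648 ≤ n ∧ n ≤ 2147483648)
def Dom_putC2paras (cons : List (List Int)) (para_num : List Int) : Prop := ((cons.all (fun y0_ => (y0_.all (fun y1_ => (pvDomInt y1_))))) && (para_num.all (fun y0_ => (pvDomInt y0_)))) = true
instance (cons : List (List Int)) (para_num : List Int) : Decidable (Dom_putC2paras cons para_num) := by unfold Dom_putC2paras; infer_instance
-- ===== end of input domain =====

-- B changes the algorithm: prefix-sum boundaries plus one pass over (constraint, variable)
-- pairs with binary-search (bisect_right) group lookup, instead of A's group-major rescans.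

-- ===== PORT A =====
-- one iteration of A's outer loop: compute l and r from the index and the running r,
-- then the two inner loops append c into this group's list
def stepA (cons : List (List Int)) (st : List (List (List Int)) × Int) (ip : Int × Int) :
    List (List (List Int)) × Int :=
  let l : Int := if ip.1 ≠ 0 then st.2 else 0
  let r : Int := if ip.1 ≠ 0 then st.2 + ip.2 else ip.2
  let g := cons.foldl
    (fun g c => c.foldl (fun g2 v => if l ≤ v ∧ v < r then g2 ++ [c] else g2) g) []
  (st.1 ++ [g], r)

-- literal transliteration of A: loop over indices i (enumerate) carrying (para_cons, r)
def putC2paras (cons : List (List Int)) (para_num : List Int) : List (List (List Int)) :=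
  ((PySem.List.enumerate para_num 0).foldl (stepA cons) ([], 0)).1

-- ===== PORT B =====
-- port of bisect.bisect_right by its contract on sorted lists (the prefix list is
-- sorted under Pre_putC2paras): the number of elements ≤ v
def bisectRight (xs : List Int) (v : Int) : Nat := xs.countP (fun x => decide (x ≤ v))

-- B's body of the pair loop: j = bisect_right(prefix, v) - 1; if 0 <= j < n: append
def stepB (pfx : List Int) (n : Nat) (c : List Int) (gs2 : List (List (List Int)))
    (v : Int) : List (List (List Int)) :=
  -- Python: j = bisect_right(prefix, v) - 1; if 0 <= j < n: groups[j].append(c)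
  if 1 ≤ bisectRight pfx v ∧ bisectRight pfx v ≤ n then
    gs2.set (bisectRight pfx v - 1) (gs2.getD (bisectRight pfx v - 1) [] ++ [c])
  else gs2

def putC2paras_alt (cons : List (List Int)) (para_num : List Int) : List (List (List Int)) :=
  let pfx := (para_num.foldl (fun (st : List Int × Int) p => (st.1 ++ [st.2 + p], st.2 + p))
                ([0], 0)).1
  let n := para_num.length
  cons.foldl (fun gs c => c.foldl (stepB pfx n c) gs)
    (List.replicate n ([] : List (List Int)))

-- ===== PRECONDITION & SPEC =====
-- Pre_ excludes negative group sizes in para_num: negative counts are outside the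
-- task's natural domain, and there A's index ranges overlap so its grouping is an
-- implementation accident that boundary search cannot (and should not) reproduce.
def Pre_putC2paras (cons : List (List Int)) (para_num : List Int) : Prop :=
  ∀ p ∈ para_num, 0 ≤ p
instance (cons : List (List Int)) (para_num : List Int) : Decidable (Pre_putC2paras cons para_num) := by unfold Pre_putC2paras; infer_instance
def pvWitness_putC2paras : List (List Int) × List Int := ([[0, 2], [1]], [2, 1])

def Spec_putC2paras (cons : List (List Int)) (para_num : List Int) (out : List (List (List Int))) : Prop := out = putC2paras_alt cons para_num
instance (cons : List (List Int)) (para_num : List Int) (out : List (List (List Int))) : Decidable (Spec_putC2paras cons para_num out) := by unfold Spec_putC2paras; infer_instance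

-- ===== CLAIM (what is proved, stated in full; the proofs are below) =====
def Claim_equal_putC2paras : Prop := ∀ (cons : List (List Int)) (para_num : List Int), Dom_putC2paras cons para_num → Pre_putC2paras cons para_num → Spec_putC2paras cons para_num (putC2paras cons para_num)

-- ===== LEMMAS AND PROOFS =====

-- the constraints of group [l, r), in A's (constraint, variable) order
def groupOf (cons : List (List Int)) (l r : Int) : List (List Int) :=
  cons.flatMap (fun c => (c.filter (fun v => decide (l ≤ v ∧ v < r))).map (fun _ => c))

-- the groups A builds, starting from left boundary s
def specGroups (cons : List (List Int)) : List Int → Int → List (List (List Int))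
  | [], _ => []
  | p :: ps, s => groupOf cons s (s + p) :: specGroups cons ps (s + p)

-- the prefix boundaries B builds after the leading 0, starting from s
def prefList : List Int → Int → List Int
  | [], _ => []
  | p :: ps, s => (s + p) :: prefList ps (s + p)

-- partial sum of the first j group sizes
def pS (ps : List Int) (j : Nat) : Int := (ps.take j).sum

theorem inner_fold (c : List Int) (l r : Int) (cc : List Int) (g : List (List Int)) :
    c.foldl (fun g2 v => if l ≤ v ∧ v < r then g2 ++ [cc] else g2) g
      = g ++ (c.filter (fun v => decide (l ≤ v ∧ v < r))).map (fun _ => cc) := by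
  induction c generalizing g with
  | nil => simp
  | cons v vs ih =>
    by_cases h : l ≤ v ∧ v < r <;> simp [List.filter, h, ih]

theorem outer_fold {α β : Type} (xs : List α) (h : α → List β) (g : List β) :
    xs.foldl (fun acc x => acc ++ h x) g = g ++ xs.flatMap h := by
  induction xs generalizing g with
  | nil => simp
  | cons x xs ih => simp [ih]

theorem A_group (cons : List (List Int)) (l r : Int) :
    cons.foldl
        (fun g c => c.foldl (fun g2 v => if l ≤ v ∧ v < r then g2 ++ [c] else g2) g) []
      = groupOf cons l r := by
  simp only [inner_fold, outer_fold, groupOf, List.nil_append]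

theorem stepA_ne (cons : List (List Int)) (st : List (List (List Int)) × Int)
    (ip : Int × Int) (h : ip.1 ≠ 0) :
    stepA cons st ip = (st.1 ++ [groupOf cons st.2 (st.2 + ip.2)], st.2 + ip.2) := by
  simp [stepA, h, A_group]

theorem stepA_zero (cons : List (List Int)) (acc : List (List (List Int))) (p : Int) :
    stepA cons (acc, 0) (0, p) = (acc ++ [groupOf cons 0 p], p) := by
  simp [stepA, A_group]

theorem pS_zero (ps : List Int) : pS ps 0 = 0 := by simp [pS]

theorem pS_succ_cons (p : Int) (ps : List Int) (j : Nat) :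
    pS (p :: ps) (j + 1) = p + pS ps j := by
  simp [pS, List.take_succ_cons]

theorem pS_nonneg (ps : List Int) (hnn : ∀ p ∈ ps, 0 ≤ p) (j : Nat) : 0 ≤ pS ps j := by
  apply List.sum_nonneg
  intro x hx
  exact hnn x (List.mem_of_mem_take hx)

-- A's fold over the tail (indices ≥ 1) builds specGroups from the running boundary
theorem A_tail (cons : List (List Int)) (ps : List Int) :
    ∀ (s : Int), 1 ≤ s → ∀ (acc : List (List (List Int))) (r : Int),
    ((PySem.List.enumerate ps s).foldl (stepA cons) (acc, r)).1
      = acc ++ specGroups cons ps r := by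
  induction ps with
  | nil => intro s hs acc r; simp [PySem.List.enumerate_nil, specGroups]
  | cons q qs ih =>
    intro s hs acc r
    rw [PySem.List.enumerate_cons, List.foldl_cons,
        stepA_ne cons (acc, r) (s, q) (by simp; omega),
        ih (s + 1) (by omega)]
    simp [specGroups]

theorem A_eq_spec (cons : List (List Int)) (para_num : List Int) :
    putC2paras cons para_num = specGroups cons para_num 0 := by
  unfold putC2paras
  cases para_num with
  | nil => simp [PySem.List.enumerate_nil, specGroups]
  | cons p ps =>
    rw [PySem.List.enumerate_cons, List.foldl_cons, stepA_zero]
    simp only [zero_add]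
    rw [A_tail cons ps 1 (by omega)]
    simp [specGroups]

theorem spec_length (cons : List (List Int)) (ps : List Int) (s : Int) :
    (specGroups cons ps s).length = ps.length := by
  induction ps generalizing s with
  | nil => simp [specGroups]
  | cons p qs ih => simp [specGroups, ih]

theorem spec_getD (cons : List (List Int)) (ps : List Int) :
    ∀ (s : Int) (j : Nat), j < ps.length →
      (specGroups cons ps s).getD j [] = groupOf cons (s + pS ps j) (s + pS ps (j + 1)) := by
  induction ps with
  | nil => intro s j hj; simp at hj
  | cons p qs ih =>
    intro s j hj
    cases j with
    | zero => simp [specGroups, pS_zero, pS_succ_cons]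
    | succ j =>
      have := ih (s + p) j (by simpa using hj)
      simp only [specGroups, List.getD_cons_succ, this, pS_succ_cons]
      ring_nf

-- ===== B-side lemmas =====

theorem prefix_fold (ps : List Int) :
    ∀ (acc : List Int) (s : Int),
    (ps.foldl (fun (st : List Int × Int) p => (st.1 ++ [st.2 + p], st.2 + p)) (acc, s)).1
      = acc ++ prefList ps s := by
  induction ps with
  | nil => intro acc s; simp [prefList]
  | cons p qs ih => intro acc s; simp [List.foldl_cons, ih, prefList]

theorem mem_prefList_ge (ps : List Int) (hnn : ∀ p ∈ ps, 0 ≤ p) :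
    ∀ (s : Int), ∀ x ∈ prefList ps s, s ≤ x := by
  induction ps with
  | nil => intro s x hx; simp [prefList] at hx
  | cons p qs ih =>
    intro s x hx
    have hp : 0 ≤ p := hnn p (by simp)
    rcases List.mem_cons.mp hx with h | h
    · omega
    · have := ih (fun q hq => hnn q (by simp [hq])) (s + p) x h
      omega

-- the bisect characterisation: v lands in group j ↔ bisect_right returns j + 1
theorem cnt_iff (ps : List Int) :
    ∀ (s v : Int), (∀ p ∈ ps, 0 ≤ p) → ∀ (j : Nat), j < ps.length →
    ((s + pS ps j ≤ v ∧ v < s + pS ps (j + 1)) ↔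
      (s :: prefList ps s).countP (fun x => decide (x ≤ v)) = j + 1) := by
  induction ps with
  | nil => intro s v _ j hj; simp at hj
  | cons p qs ih =>
    intro s v hnn j hj
    have hp : 0 ≤ p := hnn p (by simp)
    have hnq : ∀ q ∈ qs, 0 ≤ q := fun q hq => hnn q (by simp [hq])
    have hge : ∀ x ∈ prefList (p :: qs) s, s + p ≤ x := by
      intro x hx
      rcases List.mem_cons.mp (by simpa [prefList] using hx) with h | h
      · omega
      · exact mem_prefList_ge qs hnq (s + p) x h
    have hcnt : (s :: prefList (p :: qs) s).countP (fun x => decide (x ≤ v))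
        = (prefList (p :: qs) s).countP (fun x => decide (x ≤ v))
          + (if s ≤ v then 1 else 0) := by
      simp [List.countP_cons]
    cases j with
    | zero =>
      simp only [pS_zero, add_zero, pS_succ_cons]
      constructor
      · rintro ⟨h1, h2⟩
        have hz : (prefList (p :: qs) s).countP (fun x => decide (x ≤ v)) = 0 := by
          rw [List.countP_eq_zero]
          intro x hx
          have := hge x hx
          simp; omega
        rw [hcnt, hz, if_pos h1]
      · intro h
        rw [hcnt] at h
        by_cases hs : s ≤ v
        · rw [if_pos hs] at h
          have hz : (prefList (p :: qs) s).countP (fun x => decide (x ≤ v)) = 0 := by omega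
          rw [List.countP_eq_zero] at hz
          have := hz (s + p) (by simp [prefList])
          exact ⟨hs, by simp at this; omega⟩
        · rw [if_neg hs] at h
          have hz : (prefList (p :: qs) s).countP (fun x => decide (x ≤ v)) = 0 := by
            rw [List.countP_eq_zero]
            intro x hx
            have := hge x hx
            simp; omega
          omega
    | succ j =>
      have hj' : j < qs.length := by simpa using hj
      have hih := ih (s + p) v hnq j hj'
      have hps : 0 ≤ pS qs j := pS_nonneg qs hnq j
      have hpre : prefList (p :: qs) s = (s + p) :: prefList qs (s + p) := by simp [prefList]
      constructor
      · rintro ⟨h1, h2⟩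
        rw [pS_succ_cons] at h1
        rw [pS_succ_cons] at h2
        have := hih.mp ⟨by omega, by omega⟩
        rw [hcnt, hpre, this, if_pos (by omega)]
      · intro h
        rw [hcnt, hpre] at h
        by_cases hs : s ≤ v
        · rw [if_pos hs] at h
          have hc : ((s + p) :: prefList qs (s + p)).countP (fun x => decide (x ≤ v))
              = j + 1 := by omega
          have := hih.mpr hc
          rw [pS_succ_cons, pS_succ_cons]
          exact ⟨by omega, by omega⟩
        · rw [if_neg hs] at h
          have hz : ((s + p) :: prefList qs (s + p)).countP (fun x => decide (x ≤ v)) = 0 := by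
            rw [List.countP_eq_zero]
            intro x hx
            have := hge x (by rw [hpre]; exact hx)
            simp; omega
          omega

theorem stepB_length (pfx : List Int) (n : Nat) (c : List Int)
    (gs : List (List (List Int))) (v : Int) :
    (stepB pfx n c gs v).length = gs.length := by
  unfold stepB
  split_ifs <;> simp

theorem foldl_stepB_length (pfx : List Int) (n : Nat) (c : List Int) (vars : List Int) :
    ∀ (gs : List (List (List Int))), (vars.foldl (stepB pfx n c) gs).length = gs.length := by
  induction vars with
  | nil => intro gs; rfl
  | cons v vs ih => intro gs; rw [List.foldl_cons, ih, stepB_length]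

theorem dispatch_inner (pfx : List Int) (n : Nat) (c : List Int) (vars : List Int) :
    ∀ (gs : List (List (List Int))), gs.length = n → ∀ (j : Nat), j < n →
    (vars.foldl (stepB pfx n c) gs).getD j []
      = gs.getD j []
        ++ (vars.filter (fun v => decide (bisectRight pfx v = j + 1))).map (fun _ => c) := by
  induction vars with
  | nil => intro gs _ j _; simp
  | cons v vs ih =>
    intro gs hlen j hj
    simp only [List.foldl_cons, List.filter_cons]
    by_cases hc : 1 ≤ bisectRight pfx v ∧ bisectRight pfx v ≤ n
    · have hstep : stepB pfx n c gs v
          = gs.set (bisectRight pfx v - 1) (gs.getD (bisectRight pfx v - 1) [] ++ [c]) := by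
        unfold stepB; rw [if_pos hc]
      rw [hstep, ih _ (by simp [hlen]) j hj]
      by_cases he : bisectRight pfx v = j + 1
      · have hj1 : bisectRight pfx v - 1 = j := by omega
        rw [hj1]
        have hset : (gs.set j (gs.getD j [] ++ [c])).getD j [] = gs.getD j [] ++ [c] := by
          have hjl : j < gs.length := by omega
          simp [List.getD_eq_getElem?_getD, hjl]
        rw [hset]
        simp [he, List.append_assoc]
      · have hne : bisectRight pfx v - 1 ≠ j := by omega
        have hset : (gs.set (bisectRight pfx v - 1)
              (gs.getD (bisectRight pfx v - 1) [] ++ [c])).getD j [] = gs.getD j [] := by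
          simp [List.getD_eq_getElem?_getD, List.getElem?_set_ne hne]
        rw [hset]
        simp [he]
    · have hstep : stepB pfx n c gs v = gs := by unfold stepB; rw [if_neg hc]
      rw [hstep, ih gs hlen j hj]
      have he : ¬ bisectRight pfx v = j + 1 := fun h => hc ⟨by omega, by omega⟩
      simp [he]

theorem dispatch_outer (pfx : List Int) (n : Nat) (cs : List (List Int)) :
    ∀ (gs : List (List (List Int))), gs.length = n → ∀ (j : Nat), j < n →
    (cs.foldl (fun gs c => c.foldl (stepB pfx n c) gs) gs).getD j []
      = gs.getD j []
        ++ cs.flatMap (fun c =>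
            ((c.filter (fun v => decide (bisectRight pfx v = j + 1))).map (fun _ => c))) := by
  induction cs with
  | nil => intro gs _ j _; simp
  | cons c cs ih =>
    intro gs hlen j hj
    simp only [List.foldl_cons, List.flatMap_cons]
    rw [ih _ (by rw [foldl_stepB_length, hlen]) j hj,
        dispatch_inner pfx n c c gs hlen j hj, List.append_assoc]

theorem B_pfx (para_num : List Int) :
    (para_num.foldl (fun (st : List Int × Int) p => (st.1 ++ [st.2 + p], st.2 + p))
        ([0], 0)).1 = 0 :: prefList para_num 0 := by
  rw [prefix_fold]; simp

theorem foldl_fold_stepB_length (pfx : List Int) (n : Nat) (cs : List (List Int)) :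
    ∀ (gs : List (List (List Int))),
    (cs.foldl (fun gs c => c.foldl (stepB pfx n c) gs) gs).length = gs.length := by
  induction cs with
  | nil => intro gs; rfl
  | cons c cs ih => intro gs; rw [List.foldl_cons, ih, foldl_stepB_length]

theorem B_length (cons : List (List Int)) (para_num : List Int) :
    (putC2paras_alt cons para_num).length = para_num.length := by
  unfold putC2paras_alt
  rw [foldl_fold_stepB_length]
  simp

theorem B_getD (cons : List (List Int)) (para_num : List Int)
    (hnn : ∀ p ∈ para_num, 0 ≤ p) (j : Nat) (hj : j < para_num.length) :
    (putC2paras_alt cons para_num).getD j []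
      = groupOf cons (pS para_num j) (pS para_num (j + 1)) := by
  unfold putC2paras_alt
  rw [dispatch_outer _ para_num.length cons (List.replicate para_num.length []) (by simp) j hj]
  simp only [List.getD_eq_getElem?_getD, List.getElem?_replicate, hj, if_pos, Option.getD_some,
    List.nil_append]
  rw [B_pfx]
  unfold groupOf
  congr 1
  funext c
  congr 1
  apply List.filter_congr
  intro v _
  have := cnt_iff para_num 0 v hnn j hj
  simp only [zero_add] at this
  simp only [bisectRight]
  rw [decide_eq_decide]
  exact this.symm

-- ===== VERDICT (by name: the statement is the Claim_ definition above) =====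
theorem putC2paras_spec : Claim_equal_putC2paras := by
  intro cons para_num _ hpre
  unfold Spec_putC2paras
  rw [A_eq_spec]
  apply List.ext_getElem
  · rw [spec_length, B_length]
  · intro i h1 h2
    rw [← List.getD_eq_getElem (specGroups cons para_num 0) [] h1,
        ← List.getD_eq_getElem (putC2paras_alt cons para_num) [] h2]
    have hi : i < para_num.length := by rwa [spec_length] at h1
    rw [spec_getD cons para_num 0 i hi, B_getD cons para_num hpre i hi]
    simp
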